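-- pv_equiv track=rewrite | github.com/CodeMagePrasanth/Python_Development | PROGRAMS/N2_number program (Functions)/5.spy number.py | spy
-- ===== SOURCE A (Python) =====
-- def spy(num):
--     add = 0
--     mul = 1
--     while (num != 0):
--         add += num % 10
--         mul *= add
--         num //= 10
--     return add % mul
--
-- num = 123
-- ===== SOURCE B (Python) =====
-- def spy(num):
--     # Build the list of running digit sums recursively from the high digits:
--     # prefix_sums(n) is the list of digit sums of n % 10**k for k = 1..len(digits),
--     # since each sum of n = 10*q + r is r plus the corresponding sum of q.
--     def prefix_sums(n):
--         if n == 0: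
--             return []
--         r = n % 10
--         return [r] + [r + s for s in prefix_sums(n // 10)]
--
--     ps = prefix_sums(num)
--     add = ps[-1] if ps else 0
--     mul = 1
--     for s in ps:
--         mul *= s
--     return add % mul
-- ===== Notes on version B (the rewrite author's own statement) =====
-- stated objective: alternative
-- what changed: B replaces A's fused accumulator loop by a non-tail recursion that builds the list of running digit sums top-down (prefix_sums(10*q+r) = r consed onto r+ each sum of q), then takes its last element as add and its product as mul.
-- outside the precondition, e.g. on spy(10): A raises ZeroDivisionError, B raises ZeroDivisionError
import Mathlib
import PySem

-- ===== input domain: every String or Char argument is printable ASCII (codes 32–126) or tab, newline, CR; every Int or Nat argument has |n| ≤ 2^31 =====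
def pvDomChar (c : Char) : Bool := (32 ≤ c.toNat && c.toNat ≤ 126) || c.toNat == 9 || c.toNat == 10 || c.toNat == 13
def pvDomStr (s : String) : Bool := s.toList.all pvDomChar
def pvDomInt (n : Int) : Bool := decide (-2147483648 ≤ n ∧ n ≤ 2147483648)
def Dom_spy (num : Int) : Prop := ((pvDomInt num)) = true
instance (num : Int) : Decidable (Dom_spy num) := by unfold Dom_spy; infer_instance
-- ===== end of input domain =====

-- B builds the list of running digit sums by non-tail recursion (shift-and-cons) and folds a product over it, instead of A's fused accumulator loop; alternative decomposition, same return value on Pre_.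


-- ===== PORT A =====
-- A's while-loop: state (add, mul); fuel num.natAbs+1 suffices on Pre_ (num ≥ 0)
def spyLoop : Nat → Int → Int → Int → Int × Int
  | 0, _, add, mul => (add, mul)
  | f+1, num, add, mul =>
    if num = 0 then (add, mul)
    else
      spyLoop f (PySem.Int.floordiv num 10)
        (add + PySem.Int.mod num 10) (mul * (add + PySem.Int.mod num 10))

def spy (num : Int) : Int :=
  let am := spyLoop (num.natAbs + 1) num 0 1
  PySem.Int.mod am.1 am.2

-- ===== PORT B =====
-- Source B's recursive helper prefix_sums (fuel num.natAbs+1 suffices on Pre_)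
def prefixSums : Nat → Int → List Int
  | 0, _ => []
  | f+1, n =>
    if n = 0 then []
    else
      PySem.Int.mod n 10 ::
        (prefixSums f (PySem.Int.floordiv n 10)).map (fun s => PySem.Int.mod n 10 + s)

def spy_alt (num : Int) : Int :=
  let ps := prefixSums (num.natAbs + 1) num
  -- 'ps[-1] if ps else 0' = the last element, or 0 for the empty list (exact)
  let add : Int := ps.getLast?.getD 0
  let mul := ps.foldl (fun mul s => mul * s) 1
  PySem.Int.mod add mul

-- ===== PRECONDITION & SPEC =====
-- Pre_ excludes negatives (A's while-loop never terminates there) and positive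
-- multiples of 10 (mul becomes 0 and the final add % mul raises ZeroDivisionError).
def Pre_spy (num : Int) : Prop := 0 ≤ num ∧ (num = 0 ∨ num % 10 ≠ 0)
instance (num : Int) : Decidable (Pre_spy num) := by unfold Pre_spy; infer_instance
def pvWitness_spy : Int := 123

def Spec_spy (num : Int) (out : Int) : Prop := out = spy_alt num
instance (num : Int) (out : Int) : Decidable (Spec_spy num out) := by unfold Spec_spy; infer_instance

-- ===== CLAIM (what is proved, stated in full; the proofs are below) =====
def Claim_equal_spy : Prop := ∀ (num : Int), Dom_spy num → Pre_spy num → Spec_spy num (spy num)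

-- ===== LEMMAS AND PROOFS =====

theorem foldl_mul (l : List Int) : ∀ (a : Int), l.foldl (fun m s => m * s) a = a * l.prod := by
  induction l with
  | nil => simp
  | cons x l ih => intro a; simp [List.foldl, ih, List.prod_cons]; ring

-- A's mul component is the product of (add + s) over B's prefix-sum list (same fuel)
theorem spyLoop_snd (f : Nat) : ∀ (num add mul : Int),
    (spyLoop f num add mul).2 = mul * ((prefixSums f num).map (fun s => add + s)).prod := by
  induction f with
  | zero => intro num add mul; simp [spyLoop, prefixSums]
  | succ f ih =>
    intro num add mul
    by_cases h : num = 0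
    · simp [spyLoop, prefixSums, h]
    · have hf : (fun s => add + (PySem.Int.mod num 10 + s))
          = (fun s => add + PySem.Int.mod num 10 + s) := by funext s; ring
      simp only [spyLoop, prefixSums, h, if_false, ih, List.map_cons, List.map_map,
        List.prod_cons, Function.comp_def, hf]
      ring

-- A's add component is add + the last prefix sum (0 if the list is empty)
theorem spyLoop_fst (f : Nat) : ∀ (num add mul : Int),
    (spyLoop f num add mul).1 = add + (prefixSums f num).getLast?.getD 0 := by
  induction f with
  | zero => intro num add mul; simp [spyLoop, prefixSums]
  | succ f ih =>
    intro num add mul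
    by_cases h : num = 0
    · simp [spyLoop, prefixSums, h]
    · simp only [spyLoop, prefixSums, h, if_false, ih]
      rcases hps : prefixSums f (PySem.Int.floordiv num 10) with _ | ⟨x, xs⟩
      · simp
      · simp only [List.map_cons, List.getLast?_cons_cons]
        rw [← List.map_cons, List.getLast?_map]
        cases hl : (x :: xs).getLast? with
        | none => simp at hl
        | some y => simp; ring

-- ===== VERDICT (by name: the statement is the Claim_ definition above) =====
theorem spy_spec : Claim_equal_spy := by
  intro num _ _
  unfold Spec_spy spy spy_alt
  simp only [spyLoop_fst, spyLoop_snd, foldl_mul, zero_add, one_mul]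
  simp
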